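-- pv_equiv track=rewrite | github.com/RivaJ-github/A-Friendly-Introduction-to-Number-Theory | code/exe6_6.py | hasSolution
-- ===== SOURCE A (Python) =====
-- def hasSolution(n):
--     x = y = z = 0
--     while True:
--         sum = 6*x + 10*y + 15*z
--         if sum == n:
--             return True
--         elif sum > n:
--             if y == 0 and z == 0:
--                 return False
--             if z == 0:
--                 y = 0
--                 x += 1
--             else:
--                 z = 0
--                 y += 1
--         else:
--             z += 1
--
--     return False
-- ===== SOURCE B (Python) =====
-- def hasSolution(n):
--     # Frobenius closed form for <6,10,15>: every n >= 30 is representable,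
--     # and below 30 exactly these values are.
--     return n >= 30 or n in (0, 6, 10, 12, 15, 16, 18, 20, 21, 22, 24, 25, 26, 27, 28)
-- ===== Notes on version B (the rewrite author's own statement) =====
-- stated objective: faster
-- what changed: Replaces A's exhaustive triple enumeration of coefficients with the O(1) Frobenius closed form of the numerical semigroup generated by the three coefficients: true iff n reaches the conductor or n is one of the finitely many representable values below it.
import Mathlib
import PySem

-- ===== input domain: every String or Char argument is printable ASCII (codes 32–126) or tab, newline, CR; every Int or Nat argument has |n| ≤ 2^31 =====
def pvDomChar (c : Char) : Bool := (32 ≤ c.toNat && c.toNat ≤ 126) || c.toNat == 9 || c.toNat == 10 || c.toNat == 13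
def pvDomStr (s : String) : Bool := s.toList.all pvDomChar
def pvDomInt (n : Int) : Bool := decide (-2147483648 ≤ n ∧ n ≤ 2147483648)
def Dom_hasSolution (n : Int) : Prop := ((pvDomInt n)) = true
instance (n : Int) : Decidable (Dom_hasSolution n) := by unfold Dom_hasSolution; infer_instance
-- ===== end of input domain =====

-- B replaces A's O(n^3) exhaustive search by the O(1) Frobenius closed form for <6,10,15>.

-- ===== PORT A =====
-- A's `while True` loop, transliterated with a fuel counter as a totality guard only:
-- fuel exhaustion returns false (Python's unreachable trailing `return False`), and the
-- chosen fuel is proved sufficient below, so the guard never fires on any input.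
def loopA (fuel : Nat) (n : Int) (x y z : Nat) : Bool :=
  match fuel with
  | 0 => false
  | fuel + 1 =>
    let s : Int := 6 * x + 10 * y + 15 * z
    if s = n then true
    else if s > n then
      if y = 0 ∧ z = 0 then false
      else if z = 0 then loopA fuel n (x + 1) 0 0
      else loopA fuel n x (y + 1) 0
    else loopA fuel n x y (z + 1)

def hasSolution (n : Int) : Bool :=
  let W : Nat := n.toNat + 30
  loopA (W * W * W + W * W + W) n 0 0 0

-- ===== PORT B =====
def hasSolution_alt (n : Int) : Bool :=
  decide (30 ≤ n) ||
    ([0, 6, 10, 12, 15, 16, 18, 20, 21, 22, 24, 25, 26, 27, 28] : List Int).contains n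

-- ===== PRECONDITION & SPEC =====
def Spec_hasSolution (n : Int) (out : Bool) : Prop := out = hasSolution_alt n
instance (n : Int) (out : Bool) : Decidable (Spec_hasSolution n out) := by unfold Spec_hasSolution; infer_instance

-- ===== CLAIM (what is proved, stated in full; the proofs are below) =====
def Claim_equal_hasSolution : Prop := ∀ (n : Int), Dom_hasSolution n → Spec_hasSolution n (hasSolution n)

-- ===== LEMMAS AND PROOFS =====

-- `After n x y z`: some triple at-or-after (x,y,z) in A's enumeration order solves the equation.
def After (n : Int) (x y z : Nat) : Prop :=
  ∃ x' y' z' : Nat, 6 * (x' : Int) + 10 * y' + 15 * z' = n ∧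
    (x < x' ∨ (x = x' ∧ y < y') ∨ (x = x' ∧ y = y' ∧ z ≤ z'))

-- Invariant of A's loop states reachable from (0,0,0).
def InvA (n : Int) (x y z : Nat) : Prop :=
  (1 ≤ x → 6 * (x : Int) ≤ n + 5) ∧
  (1 ≤ y → 6 * (x : Int) + 10 * y ≤ n + 9) ∧
  (1 ≤ z → 6 * (x : Int) + 10 * y + 15 * z ≤ n + 14)

-- Step-count bound for A's loop from a state satisfying InvA.
def BA (n : Int) (x y z : Nat) : Nat :=
  (n + 16 - 6 * x).toNat * (n.toNat + 30) * (n.toNat + 30)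
    + (n + 26 - 10 * y).toNat * (n.toNat + 30)
    + (n + 16 - (6 * x + 10 * y + 15 * z)).toNat + 1

lemma digit_lt_first {W a a' b' c' : Nat} (ha : a' < a) (hb : b' < W) (hc : c' < W) :
    a' * W * W + b' * W + c' < a * W * W := by
  have h1 : b' * W + c' < W * W := by nlinarith
  have h2 : a' * W * W + W * W ≤ a * W * W := by nlinarith
  omega

lemma digit_lt_second {W b b' c c' : Nat} (hb : b' < b) (hc : c' < W) :
    b' * W + c' < b * W + c := by nlinarith

lemma loopA_iff_After : ∀ (fuel : Nat) (n : Int) (x y z : Nat), InvA n x y z →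
    BA n x y z ≤ fuel → (loopA fuel n x y z = true ↔ After n x y z) := by
  intro fuel
  induction fuel with
  | zero =>
    intro n x y z _ hB
    exfalso
    have : 1 ≤ BA n x y z := by unfold BA; omega
    omega
  | succ fuel ih =>
    intro n x y z hInv hB
    obtain ⟨hx, hy, hz⟩ := hInv
    simp only [loopA]
    by_cases h1 : (6 * (x : Int) + 10 * y + 15 * z) = n
    · rw [if_pos h1]
      exact iff_of_true rfl ⟨x, y, z, h1, Or.inr (Or.inr ⟨rfl, rfl, le_refl _⟩)⟩
    · rw [if_neg h1]
      by_cases h2 : (6 * (x : Int) + 10 * y + 15 * z) > n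
      · rw [if_pos h2]
        by_cases h3 : y = 0 ∧ z = 0
        · rw [if_pos h3]
          obtain ⟨hy0, hz0⟩ := h3
          constructor
          · intro hfalse; cases hfalse
          · rintro ⟨x', y', z', heq, hd⟩
            exfalso; omega
        · rw [if_neg h3]
          by_cases h4 : z = 0
          · rw [if_pos h4]
            have hy1 : 1 ≤ y := by omega
            have hy' := hy hy1
            have hInv' : InvA n (x + 1) 0 0 := by
              refine ⟨?_, ?_, ?_⟩ <;> intro _ <;> push_cast at hy' ⊢ <;> omega
            have hBlt : BA n (x + 1) 0 0 < BA n x y z := by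
              unfold BA
              have key := digit_lt_first (W := n.toNat + 30)
                (a := (n + 16 - 6 * (x : Int)).toNat)
                (a' := (n + 16 - 6 * ((x : Nat) + 1 : Nat)).toNat)
                (b' := (n + 26 - 10 * ((0 : Nat) : Int)).toNat)
                (c' := (n + 16 - (6 * ((x : Nat) + 1 : Nat) + 10 * ((0 : Nat) : Int)
                  + 15 * ((0 : Nat) : Int))).toNat)
                (by push_cast at hy' ⊢; omega) (by push_cast; omega) (by push_cast; omega)
              push_cast at key ⊢
              omega
            rw [ih n (x + 1) 0 0 hInv' (by omega)]
            constructor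
            · rintro ⟨x', y', z', heq, hd⟩
              exact ⟨x', y', z', heq, by omega⟩
            · rintro ⟨x', y', z', heq, hd⟩
              refine ⟨x', y', z', heq, ?_⟩
              -- any solution at-or-after (x,y,0) has x' > x: at x all remaining sums exceed n
              by_contra hcon
              push Not at hcon
              omega
          · rw [if_neg h4]
            have hz1 : 1 ≤ z := by omega
            have hzb := hz hz1
            have hInv' : InvA n x (y + 1) 0 := by
              refine ⟨hx, ?_, ?_⟩ <;> intro _ <;> push_cast at hzb ⊢ <;> omega
            have hBlt : BA n x (y + 1) 0 < BA n x y z := by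
              unfold BA
              have key := digit_lt_second (W := n.toNat + 30)
                (b := (n + 26 - 10 * (y : Int)).toNat)
                (b' := (n + 26 - 10 * ((y : Nat) + 1 : Nat)).toNat)
                (c := (n + 16 - (6 * (x : Int) + 10 * y + 15 * z)).toNat)
                (c' := (n + 16 - (6 * (x : Int) + 10 * ((y : Nat) + 1 : Nat)
                  + 15 * ((0 : Nat) : Int))).toNat)
                (by push_cast at hzb ⊢; omega) (by push_cast; omega)
              push_cast at key ⊢
              omega
            rw [ih n x (y + 1) 0 hInv' (by omega)]
            constructor
            · rintro ⟨x', y', z', heq, hd⟩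
              exact ⟨x', y', z', heq, by omega⟩
            · rintro ⟨x', y', z', heq, hd⟩
              refine ⟨x', y', z', heq, ?_⟩
              by_contra hcon
              push Not at hcon
              omega
      · rw [if_neg h2]
        have hlt : (6 * (x : Int) + 10 * y + 15 * z) < n := by omega
        have hInv' : InvA n x y (z + 1) := by
          refine ⟨hx, hy, ?_⟩; intro _; push_cast at hlt ⊢; omega
        have hBlt : BA n x y (z + 1) < BA n x y z := by
          unfold BA
          have hc : (n + 16 - (6 * (x : Int) + 10 * y + 15 * ((z : Nat) + 1 : Nat))).toNat
              < (n + 16 - (6 * (x : Int) + 10 * y + 15 * z)).toNat := by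
            push_cast; omega
          push_cast at hc ⊢
          omega
        rw [ih n x y (z + 1) hInv' (by omega)]
        constructor
        · rintro ⟨x', y', z', heq, hd⟩
          exact ⟨x', y', z', heq, by omega⟩
        · rintro ⟨x', y', z', heq, hd⟩
          refine ⟨x', y', z', heq, ?_⟩
          by_contra hcon
          push Not at hcon
          omega

lemma hasSolution_iff_rep (n : Int) :
    hasSolution n = true ↔ ∃ x y z : Nat, 6 * (x : Int) + 10 * y + 15 * z = n := by
  unfold hasSolution
  have hInv : InvA n 0 0 0 := by refine ⟨?_, ?_, ?_⟩ <;> intro h <;> omega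
  have hfuel : BA n 0 0 0 ≤
      (n.toNat + 30) * (n.toNat + 30) * (n.toNat + 30)
        + (n.toNat + 30) * (n.toNat + 30) + (n.toNat + 30) := by
    unfold BA
    push_cast
    have ha : (n + 16 - 0).toNat ≤ n.toNat + 30 := by omega
    have hb : (n + 26 - 0).toNat ≤ n.toNat + 30 := by omega
    have h1 := Nat.mul_le_mul_right (n.toNat + 30) (Nat.mul_le_mul_right (n.toNat + 30) ha)
    have h2 := Nat.mul_le_mul_right (n.toNat + 30) hb
    omega
  rw [loopA_iff_After _ n 0 0 0 hInv hfuel]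
  constructor
  · rintro ⟨x', y', z', heq, _⟩; exact ⟨x', y', z', heq⟩
  · rintro ⟨x', y', z', heq⟩
    exact ⟨x', y', z', heq, by omega⟩

lemma rep_of_ge30 (n : Int) (h : 30 ≤ n) : ∃ x y z : Nat, 6 * (x : Int) + 10 * y + 15 * z = n := by
  have h6 : n % 6 = 0 ∨ n % 6 = 1 ∨ n % 6 = 2 ∨ n % 6 = 3 ∨ n % 6 = 4 ∨ n % 6 = 5 := by omega
  rcases h6 with h6 | h6 | h6 | h6 | h6 | h6
  · exact ⟨(n / 6).toNat, 0, 0, by push_cast; omega⟩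
  · exact ⟨((n - 25) / 6).toNat, 1, 1, by push_cast; omega⟩
  · exact ⟨((n - 20) / 6).toNat, 2, 0, by push_cast; omega⟩
  · exact ⟨((n - 15) / 6).toNat, 0, 1, by push_cast; omega⟩
  · exact ⟨((n - 10) / 6).toNat, 1, 0, by push_cast; omega⟩
  · exact ⟨((n - 35) / 6).toNat, 2, 1, by push_cast; omega⟩

lemma rep_iff_closed (n : Int) :
    (∃ x y z : Nat, 6 * (x : Int) + 10 * y + 15 * z = n) ↔
      (30 ≤ n ∨ n = 0 ∨ n = 6 ∨ n = 10 ∨ n = 12 ∨ n = 15 ∨ n = 16 ∨ n = 18 ∨ n = 20 ∨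
        n = 21 ∨ n = 22 ∨ n = 24 ∨ n = 25 ∨ n = 26 ∨ n = 27 ∨ n = 28) := by
  constructor
  · rintro ⟨x, y, z, heq⟩
    by_cases hn : 30 ≤ n
    · exact Or.inl hn
    · have hx : x ≤ 4 := by omega
      have hy : y ≤ 2 := by omega
      have hz : z ≤ 1 := by omega
      interval_cases x <;> interval_cases y <;> interval_cases z <;> omega
  · intro h
    rcases h with h | h
    · exact rep_of_ge30 n h
    · rcases h with h | h | h | h | h | h | h | h | h | h | h | h | h | h | h <;> subst h
      · exact ⟨0, 0, 0, by norm_num⟩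
      · exact ⟨1, 0, 0, by norm_num⟩
      · exact ⟨0, 1, 0, by norm_num⟩
      · exact ⟨2, 0, 0, by norm_num⟩
      · exact ⟨0, 0, 1, by norm_num⟩
      · exact ⟨1, 1, 0, by norm_num⟩
      · exact ⟨3, 0, 0, by norm_num⟩
      · exact ⟨0, 2, 0, by norm_num⟩
      · exact ⟨1, 0, 1, by norm_num⟩
      · exact ⟨2, 1, 0, by norm_num⟩
      · exact ⟨4, 0, 0, by norm_num⟩
      · exact ⟨0, 1, 1, by norm_num⟩
      · exact ⟨1, 2, 0, by norm_num⟩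
      · exact ⟨2, 0, 1, by norm_num⟩
      · exact ⟨3, 1, 0, by norm_num⟩

lemma hasSolution_alt_iff (n : Int) :
    hasSolution_alt n = true ↔
      (30 ≤ n ∨ n = 0 ∨ n = 6 ∨ n = 10 ∨ n = 12 ∨ n = 15 ∨ n = 16 ∨ n = 18 ∨ n = 20 ∨
        n = 21 ∨ n = 22 ∨ n = 24 ∨ n = 25 ∨ n = 26 ∨ n = 27 ∨ n = 28) := by
  unfold hasSolution_alt
  simp

-- ===== VERDICT (by name: the statement is the Claim_ definition above) =====
theorem hasSolution_spec : Claim_equal_hasSolution := by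
  intro n _
  unfold Spec_hasSolution
  have h1 := hasSolution_iff_rep n
  have h2 := rep_iff_closed n
  have h3 := hasSolution_alt_iff n
  cases ha : hasSolution n <;> cases hb : hasSolution_alt n <;> simp_all <;> omega
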